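-- pv_equiv track=rewrite | github.com/eblack-IDT/OTEnomination_prioritization | Scripts/map_rhAmpSeq_design_to_mapping.py | build_name_to_pools
-- ===== SOURCE A (Python) =====
-- POOL_BY_PREFIX = {
--     "p0": "Primary pool",
--     "p2": "Secondary pool",
--     "sc": "Singleton collection",
-- }
--
-- def build_name_to_pools(tids_by_pool: dict[str, set[str]]) -> dict[str, list[str]]:
--     all_names: set[str] = set()
--     for tids in tids_by_pool.values():
--         all_names.update(tids)
--
--     ordered_pool_labels = [
--         POOL_BY_PREFIX["p0"],
--         POOL_BY_PREFIX["p2"],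
--         POOL_BY_PREFIX["sc"],
--     ]
--
--     name_to_pools: dict[str, list[str]] = {}
--     for name in all_names:
--         labels = [label for label in ordered_pool_labels if name in tids_by_pool.get(label, set())]
--         name_to_pools[name] = labels
--     return name_to_pools
-- ===== SOURCE B (Python) =====
-- POOL_BY_PREFIX = {
--     "p0": "Primary pool",
--     "p2": "Secondary pool",
--     "sc": "Singleton collection",
-- }
--
-- def build_name_to_pools(tids_by_pool: dict[str, set[str]]) -> dict[str, list[str]]:
--     # Inverted nesting: initialize every name with an empty list, then walk each
--     # labelled pool once and scatter its label to the names it contains.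
--     all_names: set[str] = set()
--     for tids in tids_by_pool.values():
--         all_names.update(tids)
--
--     name_to_pools: dict[str, list[str]] = {name: [] for name in all_names}
--     for label in ("Primary pool", "Secondary pool", "Singleton collection"):
--         for name in tids_by_pool.get(label, set()):
--             name_to_pools[name].append(label)
--     return name_to_pools
-- ===== Notes on version B (the rewrite author's own statement) =====
-- stated objective: alternative
-- what changed: Inverts the loop nesting: instead of testing every name against each of the three pool labels, B initializes every name to an empty list and walks each labelled pool once, appending that label to the entries of the names it contains.
import Mathlib
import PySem

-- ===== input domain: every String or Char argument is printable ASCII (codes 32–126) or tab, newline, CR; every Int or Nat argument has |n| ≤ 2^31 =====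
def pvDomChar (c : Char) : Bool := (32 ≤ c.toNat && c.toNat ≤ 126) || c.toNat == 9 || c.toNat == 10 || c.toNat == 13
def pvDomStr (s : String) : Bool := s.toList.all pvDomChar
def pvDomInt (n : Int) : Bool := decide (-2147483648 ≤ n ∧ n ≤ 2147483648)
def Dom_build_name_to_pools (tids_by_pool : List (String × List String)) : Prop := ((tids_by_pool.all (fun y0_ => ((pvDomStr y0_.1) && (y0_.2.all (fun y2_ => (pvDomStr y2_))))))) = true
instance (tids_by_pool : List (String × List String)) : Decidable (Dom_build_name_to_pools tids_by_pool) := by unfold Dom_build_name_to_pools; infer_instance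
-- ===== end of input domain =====

-- B inverts the loop nesting (walk each labelled pool once and scatter its label,
-- instead of testing every name against each label); same ordered result.

-- ===== PORT A =====
def POOL_BY_PREFIX : PySem.Dict String String :=
  PySem.Dict.ofList [("p0", "Primary pool"), ("p2", "Secondary pool"), ("sc", "Singleton collection")]

def build_name_to_pools (tids_by_pool : List (String × List String)) : List (String × List String) :=
  let all_names : PySem.Set String :=
    tids_by_pool.foldl (fun s p => PySem.Set.update s p.2) PySem.Set.empty
  let ordered_pool_labels : List String :=
    [POOL_BY_PREFIX.getD "p0" "", POOL_BY_PREFIX.getD "p2" "", POOL_BY_PREFIX.getD "sc" ""]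
  let d : PySem.Dict String (List String) :=
    all_names.foldl (fun d name =>
      d.insert name (ordered_pool_labels.filter (fun label =>
        PySem.Set.contains (PySem.Dict.getD ⟨tids_by_pool⟩ label PySem.Set.empty) name)))
      PySem.Dict.empty
  d.items

-- ===== PORT B =====
def build_name_to_pools_alt (tids_by_pool : List (String × List String)) : List (String × List String) :=
  let all_names : PySem.Set String :=
    tids_by_pool.foldl (fun s p => PySem.Set.update s p.2) PySem.Set.empty
  let d0 : PySem.Dict String (List String) :=
    all_names.foldl (fun d name => d.insert name []) PySem.Dict.empty
  let d : PySem.Dict String (List String) :=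
    ["Primary pool", "Secondary pool", "Singleton collection"].foldl (fun d label =>
      (PySem.Dict.getD ⟨tids_by_pool⟩ label PySem.Set.empty).foldl
        (fun d name => d.modify name [] (· ++ [label])) d) d0
  d.items

-- ===== PRECONDITION & SPEC =====
-- Pre_ only states the type convention for the Python argument (each dict value is a
-- set, so its List model holds distinct elements); it excludes no actual Python input.
def Pre_build_name_to_pools (tids_by_pool : List (String × List String)) : Prop :=
  ∀ p ∈ tids_by_pool, p.2.Nodup
instance (tids_by_pool : List (String × List String)) : Decidable (Pre_build_name_to_pools tids_by_pool) := by unfold Pre_build_name_to_pools; infer_instance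

def pvWitness_build_name_to_pools : (List (String × List String)) :=
  [("Primary pool", ["a", "b"]), ("other", ["c"])]

def Spec_build_name_to_pools (tids_by_pool : List (String × List String)) (out : List (String × List String)) : Prop := out = build_name_to_pools_alt tids_by_pool
instance (tids_by_pool : List (String × List String)) (out : List (String × List String)) : Decidable (Spec_build_name_to_pools tids_by_pool out) := by unfold Spec_build_name_to_pools; infer_instance

-- ===== CLAIM (what is proved, stated in full; the proofs are below) =====
def Claim_equal_build_name_to_pools : Prop := ∀ (tids_by_pool : List (String × List String)), Dom_build_name_to_pools tids_by_pool → Pre_build_name_to_pools tids_by_pool → Spec_build_name_to_pools tids_by_pool (build_name_to_pools tids_by_pool)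

-- ===== LEMMAS AND PROOFS =====

-- membership in A/B's running union of the value lists
theorem mem_foldl_setUpdate (xs : List (String × List String)) (s : PySem.Set String) (x : String) :
    x ∈ xs.foldl (fun s p => PySem.Set.update s p.2) s ↔ x ∈ s ∨ ∃ p ∈ xs, x ∈ p.2 := by
  induction xs generalizing s with
  | nil => simp
  | cons a xs ih => simp [ih, PySem.Set.mem_update, or_assoc]

theorem nodup_foldl_setUpdate (xs : List (String × List String)) (s : PySem.Set String)
    (hs : s.Nodup) : (xs.foldl (fun s p => PySem.Set.update s p.2) s).Nodup := by
  induction xs generalizing s with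
  | nil => exact hs
  | cons a xs ih => exact ih _ (PySem.Set.nodup_update _ _ hs)

-- dict.get(k, []) on the raw input list returns [] or one of the value lists
theorem getD_mk_cases (xs : List (String × List String)) (k : String) :
    PySem.Dict.getD ⟨xs⟩ k [] = [] ∨ ∃ p ∈ xs, PySem.Dict.getD ⟨xs⟩ k [] = p.2 := by
  induction xs with
  | nil => left; rfl
  | cons a xs ih =>
    rw [PySem.Dict.getD_eq_get?_getD, PySem.Dict.get?_mk_cons]
    by_cases h : a.1 == k
    · simp only [h]
      right; exact ⟨a, by simp, rfl⟩
    · simp only [h, Bool.false_eq_true, if_false, ← PySem.Dict.getD_eq_get?_getD]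
      rcases ih with h' | ⟨p, hp, h'⟩
      · left; exact h'
      · right; exact ⟨p, by simp [hp], h'⟩

-- looking a key up in a dict whose items are (n, h n) for n ∈ N gives h of the key
theorem getD_mapDict (N : List String) (h : String → List String) (n₀ : String) (hn : n₀ ∈ N) :
    PySem.Dict.getD ⟨N.map (fun n => (n, h n))⟩ n₀ [] = h n₀ := by
  induction N with
  | nil => simp at hn
  | cons a N ih =>
    rw [List.map_cons, PySem.Dict.getD_eq_get?_getD, PySem.Dict.get?_mk_cons]
    by_cases ha : a = n₀
    · simp [ha]
    · have : n₀ ∈ N := (List.mem_cons.mp hn).resolve_left (fun h' => ha h'.symm)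
      simp only [beq_iff_eq, ha, if_false, ← PySem.Dict.getD_eq_get?_getD]
      exact ih this

theorem insert_mapDict (N : List String) (h : String → List String) (n₀ : String)
    (hn : n₀ ∈ N) (v : List String) :
    PySem.Dict.insert ⟨N.map (fun n => (n, h n))⟩ n₀ v
      = ⟨N.map (fun n => (n, if n = n₀ then v else h n))⟩ := by
  have hc : PySem.Dict.contains (⟨N.map (fun n => (n, h n))⟩ : PySem.Dict String (List String)) n₀ = true := by
    simp only [PySem.Dict.contains, List.any_eq_true]
    exact ⟨(n₀, h n₀), List.mem_map.mpr ⟨n₀, hn, rfl⟩, by simp⟩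
  simp only [PySem.Dict.insert, hc, if_pos]
  apply PySem.Dict.ext
  simp only [List.map_map]
  apply List.map_congr_left
  intro n _
  by_cases hne : n = n₀ <;> simp [hne]

theorem modify_mapDict (N : List String) (h : String → List String) (n₀ : String)
    (hn : n₀ ∈ N) (f : List String → List String) :
    PySem.Dict.modify ⟨N.map (fun n => (n, h n))⟩ n₀ [] f
      = ⟨N.map (fun n => (n, if n = n₀ then f (h n) else h n))⟩ := by
  rw [PySem.Dict.modify, getD_mapDict N h n₀ hn, insert_mapDict N h n₀ hn]
  apply PySem.Dict.ext
  apply List.map_congr_left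
  intro n _
  by_cases hne : n = n₀ <;> simp [hne]

-- one pool pass of B: appending label to the members of ns
theorem pass_mapDict (ns : List String) (N : List String) (h : String → List String)
    (l : String) (hnd : ns.Nodup) (hsub : ∀ x ∈ ns, x ∈ N) :
    ns.foldl (fun d name => PySem.Dict.modify d name [] (· ++ [l]))
        (⟨N.map (fun n => (n, h n))⟩ : PySem.Dict String (List String))
      = ⟨N.map (fun n => (n, h n ++ if n ∈ ns then [l] else []))⟩ := by
  induction ns generalizing h with
  | nil => simp
  | cons n₀ ns ih =>
    rw [List.foldl_cons, modify_mapDict N h n₀ (hsub n₀ (by simp)),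
        ih _ hnd.of_cons (fun x hx => hsub x (by simp [hx]))]
    apply PySem.Dict.ext
    apply List.map_congr_left
    intro n _
    by_cases hne : n = n₀
    · subst hne
      have : n ∉ ns := (List.nodup_cons.mp hnd).1
      simp [this]
    · by_cases hns : n ∈ ns <;> simp [hne, hns]

-- B's outer loop over the labels accumulates exactly A's per-name filter
theorem passes_mapDict (L : List String) (G : String → List String) (N : List String)
    (h : String → List String)
    (hG : ∀ l, (G l).Nodup ∧ ∀ x ∈ G l, x ∈ N) :
    L.foldl (fun d label =>
        (G label).foldl (fun d name => PySem.Dict.modify d name [] (· ++ [label])) d)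
        (⟨N.map (fun n => (n, h n))⟩ : PySem.Dict String (List String))
      = ⟨N.map (fun n => (n, h n ++ L.filter (fun l => decide (n ∈ G l))))⟩ := by
  induction L generalizing h with
  | nil => simp
  | cons l L ih =>
    rw [List.foldl_cons, pass_mapDict (G l) N h l (hG l).1 (hG l).2, ih]
    apply PySem.Dict.ext
    apply List.map_congr_left
    intro n _
    by_cases hl : n ∈ G l <;> simp [hl]

-- ===== VERDICT (by name: the statement is the Claim_ definition above) =====
theorem build_name_to_pools_spec : Claim_equal_build_name_to_pools := by
  intro tids _ hpre
  unfold Spec_build_name_to_pools build_name_to_pools build_name_to_pools_alt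
  set N : PySem.Set String :=
    tids.foldl (fun s p => PySem.Set.update s p.2) PySem.Set.empty with hN
  have hNd : N.Nodup := nodup_foldl_setUpdate tids _ (by simp [PySem.Set.empty])
  set G : String → List String :=
    fun label => PySem.Dict.getD ⟨tids⟩ label PySem.Set.empty with hGdef
  have hG : ∀ l, (G l).Nodup ∧ ∀ x ∈ G l, x ∈ N := by
    intro l
    rcases getD_mk_cases tids l with h | ⟨p, hp, h⟩
    · constructor
      · rw [hGdef]; show (PySem.Dict.getD _ _ ([] : List String)).Nodup
        rw [h]; exact List.nodup_nil
      · intro x hx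
        rw [hGdef] at hx; simp only at hx
        rw [show PySem.Set.empty = ([] : List String) from rfl, h] at hx
        simp at hx
    · constructor
      · rw [hGdef]; show (PySem.Dict.getD _ _ ([] : List String)).Nodup
        rw [h]; exact hpre p hp
      · intro x hx
        rw [hGdef] at hx; simp only at hx
        rw [show PySem.Set.empty = ([] : List String) from rfl, h] at hx
        rw [hN, mem_foldl_setUpdate]
        exact Or.inr ⟨p, hp, hx⟩
  -- the two label lists coincide
  have hlabels : [POOL_BY_PREFIX.getD "p0" "", POOL_BY_PREFIX.getD "p2" "", POOL_BY_PREFIX.getD "sc" ""]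
      = ["Primary pool", "Secondary pool", "Singleton collection"] := by decide
  -- A's dict: a fold of fresh inserts over the distinct names
  have hA : (N.foldl (fun d name =>
        d.insert name ((["Primary pool", "Secondary pool", "Singleton collection"] : List String).filter
          (fun label => PySem.Set.contains (G label) name))) PySem.Dict.empty).items
      = N.map (fun n => (n, (["Primary pool", "Secondary pool", "Singleton collection"] : List String).filter
          (fun label => PySem.Set.contains (G label) n))) := by
    have := PySem.Dict.items_foldl_insert_fresh (l := N) (k := fun n => n)
      (v := fun n => (["Primary pool", "Secondary pool", "Singleton collection"] : List String).filter
          (fun label => PySem.Set.contains (G label) n))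
      (d := PySem.Dict.empty) (by intro a _; rfl) (by simpa using hNd)
    simpa using this
  -- B's initial dict {name: [] for name in all_names}
  have hB0 : (N.foldl (fun d name => d.insert name []) (PySem.Dict.empty : PySem.Dict String (List String)))
      = ⟨N.map (fun n => (n, ([] : List String)))⟩ := by
    apply PySem.Dict.ext
    have := PySem.Dict.items_foldl_insert_fresh (l := N) (k := fun n => n)
      (v := fun _ => ([] : List String)) (d := PySem.Dict.empty) (by intro a _; rfl) (by simpa using hNd)
    simpa using this
  simp only [hlabels, hGdef] at *
  rw [hA, hB0, passes_mapDict _ _ N _ hG]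
  show _ = List.map _ N
  apply List.map_congr_left
  intro n _
  simp only [List.nil_append, Prod.mk.injEq, true_and]
  apply List.filter_congr
  intro l _
  simp [PySem.Set.contains_eq_listContains]
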